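-- pv_equiv track=rewrite | github.com/ecolban/Codewars | python_code/src/caesar_cipher.py | parts
-- ===== SOURCE A (Python) =====
-- from math import ceil
--
-- def parts(a, k):
--     n = len(a)
--     start = 0
--     p = ceil(n / k)
--     for i in range(k):
--         p = min(n, p)
--         yield ''.join(a[start: start + p])
--         start += p
--         n -= p
-- ===== SOURCE B (Python) =====
-- def parts(a, k):
--     p = -(-len(a) // k)  # exact ceiling division, computed once
--     it = iter(a)
--     for _ in range(k):
--         # consume up to p items from the shared iterator; no indices, no slicing
--         yield ''.join(c for _, c in zip(range(p), it))
-- ===== Notes on version B (the rewrite author's own statement) =====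
-- stated objective: idiomatic
-- what changed: B replaces A's index bookkeeping (mutable start, remaining n, re-clamped p and slicing) by a single shared iterator over the sequence: each chunk is built by consuming up to p items from that iterator with zip(range(p), it), so there is no slicing and no index arithmetic at all; p = ceil(len(a)/k) is computed once by exact ceiling division.
import Mathlib
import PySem

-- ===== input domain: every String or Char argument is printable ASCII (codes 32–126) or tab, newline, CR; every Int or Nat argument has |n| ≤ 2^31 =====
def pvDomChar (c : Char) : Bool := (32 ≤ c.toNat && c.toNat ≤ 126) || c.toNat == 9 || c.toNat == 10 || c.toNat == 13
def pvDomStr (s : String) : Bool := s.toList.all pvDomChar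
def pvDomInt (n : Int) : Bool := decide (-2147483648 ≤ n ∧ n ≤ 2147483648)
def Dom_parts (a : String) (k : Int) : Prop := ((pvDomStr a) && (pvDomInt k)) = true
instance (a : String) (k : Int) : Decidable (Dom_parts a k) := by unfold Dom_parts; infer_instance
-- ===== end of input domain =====

-- B consumes one shared iterator, taking up to p items per chunk, instead of A's mutable start/n/p slicing (objective: idiomatic).

-- ===== PORT A =====
-- one loop iteration of A: state is (accumulated chunks, start, n, p)
def partsStep (xs : List Char) (st : List String × Int × Int × Int) (_i : Int) :
    List String × Int × Int × Int :=
  let p := min st.2.2.1 st.2.2.2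
  (st.1 ++ [String.ofList (PySem.List.slice xs (some st.2.1) (some (st.2.1 + p)))],
   st.2.1 + p, st.2.2.1 - p, p)

def parts (a : String) (k : Int) : List String :=
  let n : Int := (a.toList.length : Int)
  -- math.ceil(n / k) ported as exact integer ceiling division (k ≠ 0 is in Pre_)
  let p : Int := -(PySem.Int.floordiv (-n) k)
  ((PySem.List.pyRange 0 k 1).foldl (partsStep a.toList) ([], 0, n, p)).1

-- ===== PORT B =====
-- one loop iteration of B: the state is (remaining part of the iterator, accumulated chunks);
-- zip(range(p), it) consumes up to p items, i.e. take/drop of p.toNat (zip takes 0 for p < 0)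
def partsAltStep (q : Nat) (st : List Char × List String) (_a : Int) : List Char × List String :=
  (st.1.drop q, st.2 ++ [String.ofList (st.1.take q)])

def parts_alt (a : String) (k : Int) : List String :=
  let p : Int := -(PySem.Int.floordiv (-(a.toList.length : Int)) k)
  ((PySem.List.pyRange 0 k 1).foldl (partsAltStep p.toNat) (a.toList, [])).2

-- ===== PRECONDITION & SPEC =====
-- k = 0 is excluded: there Python A (and B) raise ZeroDivisionError.
def Pre_parts (a : String) (k : Int) : Prop := k ≠ 0
instance (a : String) (k : Int) : Decidable (Pre_parts a k) := by unfold Pre_parts; infer_instance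
def pvWitness_parts : String × Int := ("abcde", 2)

def Spec_parts (a : String) (k : Int) (out : List String) : Prop := out = parts_alt a k
instance (a : String) (k : Int) (out : List String) : Decidable (Spec_parts a k out) := by unfold Spec_parts; infer_instance

-- ===== CLAIM (what is proved, stated in full; the proofs are below) =====
def Claim_equal_parts : Prop := ∀ (a : String) (k : Int), Dom_parts a k → Pre_parts a k → Spec_parts a k (parts a k)

-- ===== LEMMAS AND PROOFS =====

-- both chunks are the same piece of xs: A slices from the clamped start min(n0,i*p0)
-- with the clamped width, B slices from i*p0 with width p0; slice clamping makes them equal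
lemma chunk_eq (xs : List Char) (n0 i p0 : Int) (hn0 : n0 = (xs.length : Int))
    (hi : 0 ≤ i) (hp : 0 ≤ p0) :
    PySem.List.slice xs (some (min n0 (i * p0)))
      (some (min n0 (i * p0) + min (n0 - min n0 (i * p0)) p0))
    = PySem.List.slice xs (some (i * p0)) (some ((i + 1) * p0)) := by
  have hip : 0 ≤ i * p0 := mul_nonneg hi hp
  have hlen : (0 : Int) ≤ n0 := by rw [hn0]; exact Int.natCast_nonneg _
  have hYX : (i + 1) * p0 = i * p0 + p0 := by ring
  rw [PySem.List.slice_toNat xs (by omega) (by omega),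
      PySem.List.slice_toNat xs (by omega) (by omega)]
  by_cases hle : i * p0 ≤ n0
  · have hstart : min n0 (i * p0) = i * p0 := by omega
    rw [hstart]
    by_cases hfit : p0 ≤ n0 - i * p0
    · have hc : min (n0 - i * p0) p0 = p0 := by omega
      rw [hc]
      congr 1
      omega
    · have hc : min (n0 - i * p0) p0 = n0 - i * p0 := by omega
      rw [hc]
      have hdlen : (xs.drop (i * p0).toNat).length = (n0 - i * p0).toNat := by
        simp [List.length_drop]
        omega
      rw [List.take_of_length_le (by omega), List.take_of_length_le (by omega)]
  · have hstart : min n0 (i * p0) = n0 := by omega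
    rw [hstart]
    have h1 : xs.drop n0.toNat = [] := List.drop_eq_nil_of_le (by omega)
    have h2 : xs.drop (i * p0).toNat = [] := List.drop_eq_nil_of_le (by omega)
    simp [h1, h2]

-- loop invariant for A: running A's fold from state (acc, min(n0,i*p0), n0-start, p) with
-- min n p = min n p0 appends exactly the canonical chunks for the remaining indices
lemma fold_inv (xs : List Char) (p0 : Int) (hp : 0 ≤ p0) :
    ∀ (m : Nat) (i : Int), 0 ≤ i →
    ∀ (acc : List String) (n p : Int),
      n = (xs.length : Int) - min (xs.length : Int) (i * p0) →
      min n p = min n p0 →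
      ((PySem.List.pyRange i (i + m) 1).foldl (partsStep xs)
          (acc, min (xs.length : Int) (i * p0), n, p)).1
        = acc ++ (PySem.List.pyRange i (i + m) 1).map
            (fun j => String.ofList (PySem.List.slice xs (some (j * p0)) (some ((j + 1) * p0)))) := by
  intro m
  induction m with
  | zero =>
    intro i hi acc n p hn hmin
    rw [PySem.List.pyRange_one_eq_nil (by omega)]
    simp
  | succ m ih =>
    intro i hi acc n p hn hmin
    have hip : 0 ≤ i * p0 := mul_nonneg hi hp
    have hYX : (i + 1) * p0 = i * p0 + p0 := by ring
    have hlen : (0 : Int) ≤ (xs.length : Int) := Int.natCast_nonneg _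
    have hcons : PySem.List.pyRange i (i + (m + 1 : Nat)) 1
        = i :: PySem.List.pyRange (i + 1) (i + (m + 1 : Nat)) 1 :=
      PySem.List.pyRange_one_cons (by push_cast; omega)
    rw [hcons]
    simp only [List.foldl_cons, List.map_cons]
    have hstep : partsStep xs (acc, min (xs.length : Int) (i * p0), n, p) i
        = (acc ++ [String.ofList (PySem.List.slice xs (some (i * p0)) (some ((i + 1) * p0)))],
           min (xs.length : Int) ((i + 1) * p0),
           (xs.length : Int) - min (xs.length : Int) ((i + 1) * p0), min n p0) := by
      unfold partsStep
      simp only [hmin]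
      refine Prod.ext ?_ (Prod.ext ?_ (Prod.ext ?_ rfl))
      · simp only []
        rw [show min (xs.length : Int) (i * p0) + min n p0
              = min (xs.length : Int) (i * p0)
                + min ((xs.length : Int) - min (xs.length : Int) (i * p0)) p0 from by rw [hn],
            chunk_eq xs (xs.length : Int) i p0 rfl hi hp]
      · simp only []
        omega
      · simp only []
        omega
    rw [hstep]
    have hrange : i + ((m + 1 : Nat) : Int) = (i + 1) + (m : Nat) := by push_cast; omega
    rw [hrange]
    rw [ih (i + 1) (by omega)
        (acc ++ [String.ofList (PySem.List.slice xs (some (i * p0)) (some ((i + 1) * p0)))])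
        ((xs.length : Int) - min (xs.length : Int) ((i + 1) * p0)) (min n p0)
        rfl (by omega)]
    simp

-- loop invariant for B: the fold consuming q items per step from the remaining list
-- produces the take/drop chunks of the remaining list in order
lemma fold_alt_inv (q : Nat) :
    ∀ (m : Nat) (i : Int) (rest : List Char) (acc : List String),
      ((PySem.List.pyRange i (i + m) 1).foldl (partsAltStep q) (rest, acc)).2
        = acc ++ (List.range m).map
            (fun j => String.ofList ((rest.drop (j * q)).take q)) := by
  intro m
  induction m with
  | zero =>
    intro i rest acc
    rw [PySem.List.pyRange_one_eq_nil (by omega)]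
    simp
  | succ m ih =>
    intro i rest acc
    have hcons : PySem.List.pyRange i (i + (m + 1 : Nat)) 1
        = i :: PySem.List.pyRange (i + 1) (i + (m + 1 : Nat)) 1 :=
      PySem.List.pyRange_one_cons (by push_cast; omega)
    rw [hcons]
    simp only [List.foldl_cons]
    have hrange : i + ((m + 1 : Nat) : Int) = (i + 1) + (m : Nat) := by push_cast; omega
    rw [hrange]
    rw [show partsAltStep q (rest, acc) i
          = (rest.drop q, acc ++ [String.ofList (rest.take q)]) from rfl,
        ih (i + 1) (rest.drop q) (acc ++ [String.ofList (rest.take q)])]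
    rw [List.range_succ_eq_map, List.map_cons, List.map_map]
    simp only [Nat.zero_mul, List.drop_zero, List.append_assoc, List.singleton_append]
    congr 1
    congr 1
    apply List.map_congr_left
    intro j _
    simp only [Function.comp]
    congr 2
    rw [List.drop_drop]
    congr 1
    rw [Nat.succ_mul]
    omega

-- B's take/drop chunks are exactly the canonical slice chunks (p0 ≥ 0)
lemma map_chunks_eq (xs : List Char) (p0 : Int) (hp : 0 ≤ p0) (m : Nat) :
    (List.range m).map (fun j => String.ofList ((xs.drop (j * p0.toNat)).take p0.toNat))
      = (PySem.List.pyRange 0 (m : Int) 1).map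
          (fun j => String.ofList (PySem.List.slice xs (some (j * p0)) (some ((j + 1) * p0)))) := by
  rw [PySem.List.pyRange_one]
  have hm : ((m : Int) - 0).toNat = m := by omega
  rw [hm, List.map_map]
  apply List.map_congr_left
  intro j _
  simp only [Function.comp]
  have hj : (0 : Int) ≤ (j : Int) := Int.natCast_nonneg _
  have hjp : 0 ≤ (0 + (j : Int)) * p0 := mul_nonneg (by omega) hp
  have hjp1 : 0 ≤ (0 + (j : Int) + 1) * p0 := mul_nonneg (by omega) hp
  have h1 : ((0 + (j : Int)) * p0).toNat = j * p0.toNat := by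
    have : (0 + (j : Int)) * p0 = ((j * p0.toNat : Nat) : Int) := by
      push_cast; rw [Int.toNat_of_nonneg hp]; ring
    rw [this, Int.toNat_natCast]
  have h2 : ((0 + (j : Int) + 1) * p0).toNat = j * p0.toNat + p0.toNat := by
    have : (0 + (j : Int) + 1) * p0 = ((j * p0.toNat + p0.toNat : Nat) : Int) := by
      push_cast; rw [Int.toNat_of_nonneg hp]; ring
    rw [this, Int.toNat_natCast]
  rw [PySem.List.slice_toNat xs (by omega) (by omega), h1, h2,
      Nat.add_sub_cancel_left]

-- ===== VERDICT (by name: the statement is the Claim_ definition above) =====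
theorem parts_spec : Claim_equal_parts := by
  intro a k _hdom hk
  unfold Spec_parts parts parts_alt
  rcases lt_trichotomy k 0 with hneg | hzero | hpos
  · rw [PySem.List.pyRange_one_eq_nil (by omega)]
    simp
  · exact absurd hzero hk
  · -- k > 0 : p0 = ceil(n0/k) ≥ 0 since n0 ≥ 0
    have hlen : (0 : Int) ≤ (a.toList.length : Int) := Int.natCast_nonneg _
    set p0 : Int := -(PySem.Int.floordiv (-(a.toList.length : Int)) k) with hp0
    have hp : 0 ≤ p0 := by
      have h := (PySem.Int.neg_floordiv_neg_eq_iff_of_pos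
        (a := (a.toList.length : Int)) (b := k) (q := p0) hpos).mp rfl
      nlinarith [h.1, h.2]
    have hA := fold_inv a.toList p0 hp k.toNat 0 le_rfl [] (a.toList.length : Int) p0
      (by simp) rfl
    have hB := fold_alt_inv p0.toNat k.toNat 0 a.toList []
    have hk' : (0 : Int) + (k.toNat : Int) = k := by omega
    rw [hk'] at hA hB
    simp only [List.nil_append] at hA hB
    rw [show min (a.toList.length : Int) (0 * p0) = 0 by simp] at hA
    have hmc := map_chunks_eq a.toList p0 hp k.toNat
    rw [show ((k.toNat : Nat) : Int) = k from by omega] at hmc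
    rw [hA, hB, hmc]
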